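-- pv_equiv track=rewrite | github.com/EdsonEddy/perfilTesis2 | workspace_thesis/2_RKRGST/codesight_python/py-tests/1115/139709.py | f
-- ===== SOURCE A (Python) =====
-- def f(x):
-- 	s ='0123456789'
-- 	c = 0
-- 	for i in s:
-- 		if(i==x):
-- 			return c
-- 		c += 1
-- 	return -1
-- ===== SOURCE B (Python) =====
-- def f(x):
--     # Closed form: a single digit character maps to its code offset from '0'; everything else -> -1.
--     if isinstance(x, str) and len(x) == 1 and '0' <= x <= '9':
--         return ord(x) - ord('0')
--     return -1
-- ===== Notes on version B (the rewrite author's own statement) =====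
-- stated objective: simpler
-- what changed: Replaced the counter loop over the digit string with a closed-form range check and character-code arithmetic.
import Mathlib
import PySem

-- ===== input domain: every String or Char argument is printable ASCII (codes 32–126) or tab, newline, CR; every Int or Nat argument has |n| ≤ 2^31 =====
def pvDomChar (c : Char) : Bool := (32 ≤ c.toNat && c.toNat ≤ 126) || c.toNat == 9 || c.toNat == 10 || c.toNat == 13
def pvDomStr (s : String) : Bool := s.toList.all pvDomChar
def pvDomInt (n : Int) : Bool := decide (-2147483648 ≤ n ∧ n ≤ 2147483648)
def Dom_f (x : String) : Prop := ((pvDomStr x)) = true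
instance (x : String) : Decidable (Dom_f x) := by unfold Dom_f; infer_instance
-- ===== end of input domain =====

-- B replaces A's counter loop over the digit string with a closed-form range check and character-code arithmetic (simpler).

-- ===== PORT A =====
-- the for-loop over the digit string with counter c; each i is a one-char string, so i == x compares whole strings
def fLoop (xs : List Char) (c : Int) : List Char → Int
  | [] => -1
  | d :: ds => if xs = [d] then c else fLoop xs (c + 1) ds

def f (x : String) : Int := fLoop x.toList 0 "0123456789".toList

-- ===== PORT B =====
def f_alt (x : String) : Int :=
  match x.toList with
  | [c] => if '0' ≤ c ∧ c ≤ '9' then (c.toNat : Int) - 48 else -1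
  | _ => -1

-- ===== PRECONDITION & SPEC =====
def Spec_f (x : String) (out : Int) : Prop := out = f_alt x
instance (x : String) (out : Int) : Decidable (Spec_f x out) := by unfold Spec_f; infer_instance

-- ===== CLAIM (what is proved, stated in full; the proofs are below) =====
def Claim_equal_f : Prop := ∀ (x : String), Dom_f x → Spec_f x (f x)

-- ===== LEMMAS AND PROOFS =====

theorem fLoop_not_single (xs : List Char) (h : ∀ d : Char, xs ≠ [d]) (c : Int) (ds : List Char) :
    fLoop xs c ds = -1 := by
  induction ds generalizing c with
  | nil => rfl
  | cons d ds ih => simp [fLoop, h d, ih]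

theorem char_eq_of_toNat_eq {a b : Char} (h : a.toNat = b.toNat) : a = b :=
  Char.ext (UInt32.toNat_inj.mp h)

theorem fLoop_single (c : Char) :
    fLoop [c] 0 "0123456789".toList =
      (if '0' ≤ c ∧ c ≤ '9' then ((c.toNat : Int) - 48) else -1) := by
  by_cases h0 : c = '0'; · subst h0; decide
  by_cases h1 : c = '1'; · subst h1; decide
  by_cases h2 : c = '2'; · subst h2; decide
  by_cases h3 : c = '3'; · subst h3; decide
  by_cases h4 : c = '4'; · subst h4; decide
  by_cases h5 : c = '5'; · subst h5; decide
  by_cases h6 : c = '6'; · subst h6; decide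
  by_cases h7 : c = '7'; · subst h7; decide
  by_cases h8 : c = '8'; · subst h8; decide
  by_cases h9 : c = '9'; · subst h9; decide
  have hlt : ¬ ('0' ≤ c ∧ c ≤ '9') := by
    rintro ⟨hl, hr⟩
    have hl' : (48 : Nat) ≤ c.toNat := hl
    have hr' : c.toNat ≤ 57 := hr
    interval_cases h : c.toNat <;>
      first
      | exact h0 (char_eq_of_toNat_eq h)
      | exact h1 (char_eq_of_toNat_eq h)
      | exact h2 (char_eq_of_toNat_eq h)
      | exact h3 (char_eq_of_toNat_eq h)
      | exact h4 (char_eq_of_toNat_eq h)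
      | exact h5 (char_eq_of_toNat_eq h)
      | exact h6 (char_eq_of_toNat_eq h)
      | exact h7 (char_eq_of_toNat_eq h)
      | exact h8 (char_eq_of_toNat_eq h)
      | exact h9 (char_eq_of_toNat_eq h)
  simp only [hlt, if_false]
  simp [List.cons.injEq, h0, h1, h2, h3, h4, h5, h6, h7, h8, h9, fLoop]

-- ===== VERDICT (by name: the statement is the Claim_ definition above) =====
theorem f_spec : Claim_equal_f := by
  intro x _
  unfold Spec_f f f_alt
  match hx : x.toList with
  | [c] => exact fLoop_single c
  | [] => exact fLoop_not_single [] (by simp) 0 _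
  | a :: b :: rest => exact fLoop_not_single _ (by simp) 0 _
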